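-- pv_equiv track=rewrite | github.com/crane-9/cs271 | project_6/asm_code.py | dest
-- ===== SOURCE A (Python) =====
-- def dest(mnemonic: str) -> str:
--     """
--     Translates the `dest` mnemonic string to a string of 3 bits.
--     :param mnemonic: The mnemonic to translate. Expects "A", "M", "D", or some combination.
--     :raises CodeError: If the mnemonic is not as expected.
--     :returns: 3 bits as a string.
--     """
--     # Initial destination information.
--     dest_a = False
--     dest_m = False
--     dest_d = False
--
--     for char in mnemonic:
--         # Raise error on unexpected character.
--         if char not in "AMD":  raise CodeError(f"Unexpected character in 'dest' token: '{char}'")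
--
--         # Simple repetition.
--         dest_a = dest_a or char == "A"
--         dest_m = dest_m or char == "M"
--         dest_d = dest_d or char == "D"  # Note that this method allows for "AAAAAAAAAAAAAAA" and "MMMMM" and "AMDMDMMD" to be valid tokens.
--
--     return ''.join([str(int(dest)) for dest in (dest_a, dest_d, dest_m)])
-- ===== SOURCE B (Python) =====
-- class CodeError(Exception):
--     pass
--
--
-- def dest(mnemonic: str) -> str:
--     """Validate, then compute the three bits by membership tests on the whole string."""
--     for char in mnemonic:
--         if char not in "AMD":
--             raise CodeError(f"Unexpected character in 'dest' token: '{char}'")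
--     return str(int('A' in mnemonic)) + str(int('D' in mnemonic)) + str(int('M' in mnemonic))
-- ===== Notes on version B (the rewrite author's own statement) =====
-- stated objective: idiomatic
-- what changed: Replaced the single fused pass accumulating three boolean flags with a plain validation loop followed by three whole-string membership tests concatenated directly in output order.
import Mathlib
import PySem

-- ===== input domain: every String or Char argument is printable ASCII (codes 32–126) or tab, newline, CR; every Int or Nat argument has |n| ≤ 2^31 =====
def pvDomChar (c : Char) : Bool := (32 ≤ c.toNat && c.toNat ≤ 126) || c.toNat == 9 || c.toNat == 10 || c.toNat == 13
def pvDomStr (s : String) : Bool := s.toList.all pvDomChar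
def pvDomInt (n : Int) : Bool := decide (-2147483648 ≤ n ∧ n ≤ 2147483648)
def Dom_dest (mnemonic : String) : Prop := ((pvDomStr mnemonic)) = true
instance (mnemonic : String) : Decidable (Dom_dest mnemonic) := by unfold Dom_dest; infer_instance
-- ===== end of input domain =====

-- B splits A's fused flag-accumulating loop into validation + whole-string membership tests (objective: idiomatic).

-- ===== PORT A =====
-- one pass, accumulating the three flags exactly as A's loop does; the raise branch
-- is excluded by Pre_dest, so the fold carries only the flag state
def dest (mnemonic : String) : String :=
  let s := mnemonic.toList.foldl
    (fun (st : Bool × Bool × Bool) c =>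
      (st.1 || c == 'A', st.2.1 || c == 'M', st.2.2 || c == 'D'))
    (false, false, false)
  (if s.1 then "1" else "0") ++ (if s.2.2 then "1" else "0") ++ (if s.2.1 then "1" else "0")

-- ===== PORT B =====
-- validation pass (raise excluded by Pre_dest), then three membership tests in output order
def dest_alt (mnemonic : String) : String :=
  (if mnemonic.toList.contains 'A' then "1" else "0")
    ++ (if mnemonic.toList.contains 'D' then "1" else "0")
    ++ (if mnemonic.toList.contains 'M' then "1" else "0")

-- ===== PRECONDITION & SPEC =====
-- A raises CodeError on any character outside "AMD"; Pre_ admits exactly the strings A returns on.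
def Pre_dest (mnemonic : String) : Prop :=
  mnemonic.toList.all (fun c => c == 'A' || c == 'M' || c == 'D') = true
instance (mnemonic : String) : Decidable (Pre_dest mnemonic) := by unfold Pre_dest; infer_instance

def pvWitness_dest : String := "AMD"

def Spec_dest (mnemonic : String) (out : String) : Prop := out = dest_alt mnemonic
instance (mnemonic : String) (out : String) : Decidable (Spec_dest mnemonic out) := by unfold Spec_dest; infer_instance

-- ===== CLAIM (what is proved, stated in full; the proofs are below) =====
def Claim_equal_dest : Prop := ∀ (mnemonic : String), Dom_dest mnemonic → Pre_dest mnemonic → Spec_dest mnemonic (dest mnemonic)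

-- ===== LEMMAS AND PROOFS =====

theorem dest_fold_eq (l : List Char) (a m d : Bool) :
    l.foldl (fun (st : Bool × Bool × Bool) c =>
      (st.1 || c == 'A', st.2.1 || c == 'M', st.2.2 || c == 'D')) (a, m, d)
    = (a || l.contains 'A', m || l.contains 'M', d || l.contains 'D') := by
  induction l generalizing a m d with
  | nil => simp
  | cons x xs ih =>
    simp only [List.foldl_cons, ih, List.contains_cons]
    refine Prod.ext ?_ (Prod.ext ?_ ?_) <;> simp [Bool.or_assoc, BEq.comm]

-- ===== VERDICT (by name: the statement is the Claim_ definition above) =====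
theorem dest_spec : Claim_equal_dest := by
  intro mnemonic _ _
  show dest mnemonic = dest_alt mnemonic
  simp [dest, dest_alt, dest_fold_eq]
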